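-- pv_equiv track=rewrite | github.com/Exabyte-io/rewotes | codeliciousness/basistron/basis.py | get_key_from_contraction
-- ===== SOURCE A (Python) =====
-- from typing import Any, Dict, List, Optional, Tuple
--
-- def get_key_from_contraction(
--     contraction: str,
-- ) -> Tuple[Tuple[int, ...], Tuple[int, ...]]:
--     """Create the sort key used for ranking basis sets.
--     Updates to the structure for sorting can be extended here."""
--     primitive, contracted = contraction.split(" -> ")
--
--     def parse_num(string: str):
--         """If it's stupid but it works.."""
--         ints, i, s = [], 0, ""
--         while i < len(string):
--             c = string[i]
--             if c.isdigit():
--                 s += c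
--             else:
--                 if s:
--                     ints.append(int(s))
--                 s = ""
--             i += 1
--         return ints
--
--     return tuple(parse_num(contracted)), tuple(parse_num(primitive))
-- ===== SOURCE B (Python) =====
-- def get_key_from_contraction(contraction):
--     primitive, contracted = contraction.split(" -> ")
--
--     def parse_num(string):
--         # blank out non-digit characters, then split into maximal digit runs
--         return [int(tok) for tok in "".join(c if c.isdigit() else " " for c in string).split()]
--
--     return tuple(parse_num(contracted)), tuple(parse_num(primitive))
-- ===== Notes on version B (the rewrite author's own statement) =====
-- stated objective: idiomatic
-- what changed: Replaced parse_num's manual buffered character loop (accumulate digits, flush on non-digit) with blanking non-digit characters to spaces and using str.split() to obtain the maximal digit runs.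
-- intended difference: On inputs where either part of the arrow-split ends with a digit, A silently drops that final number (its buffer is never flushed after the loop) while B includes it; the trailing digit run is evidently part of the sort key. — e.g. on get_key_from_contraction("3 -> 2"): A returns ([], []), B returns ([2], [3])
import Mathlib
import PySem

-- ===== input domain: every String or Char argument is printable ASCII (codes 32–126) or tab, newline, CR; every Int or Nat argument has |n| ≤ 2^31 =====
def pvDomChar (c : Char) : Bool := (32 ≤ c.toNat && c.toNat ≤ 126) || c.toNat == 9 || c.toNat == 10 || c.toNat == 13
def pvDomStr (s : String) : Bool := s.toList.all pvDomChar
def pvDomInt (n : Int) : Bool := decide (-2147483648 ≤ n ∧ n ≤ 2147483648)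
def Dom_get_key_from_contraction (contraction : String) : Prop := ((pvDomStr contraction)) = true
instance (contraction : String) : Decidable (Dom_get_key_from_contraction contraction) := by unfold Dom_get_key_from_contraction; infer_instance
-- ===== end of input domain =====

-- B replaces A's buffered character loop by blanking non-digits and splitting on whitespace (idiomatic);
-- on parts ending in a digit A silently drops the final number (buffer never flushed), B keeps it (see D_ below).

-- int(s) for a nonempty all-digit buffer/token: ofChars? is always `some` there, the default is never used
def pvToInt (t : List Char) : Int := (PySem.Int.ofChars? t).getD 0

-- ===== PORT A =====
-- parse_num's while-loop: state = (ints, current digit buffer s); branch order as in A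
def pvStepA (p : List Int × List Char) (c : Char) : List Int × List Char :=
  if PySem.Chars.isdigit c then (p.1, p.2 ++ [c])
  else ((if p.2.isEmpty then p.1 else p.1 ++ [pvToInt p.2]), [])

def pvParseNumA (s : List Char) : List Int := (s.foldl pvStepA ([], [])).1

def get_key_from_contraction (contraction : String) : List Int × List Int :=
  match PySem.Chars.splitOn contraction.toList " -> ".toList with
  | [primitive, contracted] => (pvParseNumA contracted, pvParseNumA primitive)
  | _ => ([], [])   -- Python raises ValueError (unpacking) here; excluded by Pre_

-- ===== PORT B =====
-- int(tok) for a token of B's split: always a nonempty digit run, so ofChars? is always `some`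
def pvToIntB (t : List Char) : Int := (PySem.Int.ofChars? t).getD 0

def pvBlank (c : Char) : Char := if PySem.Chars.isdigit c then c else ' '

def pvParseNumB (s : List Char) : List Int :=
  (PySem.Chars.split₀ (s.map pvBlank)).map pvToIntB

def get_key_from_contraction_alt (contraction : String) : List Int × List Int :=
  let ps := PySem.Chars.splitOn contraction.toList " -> ".toList
  if ps.length = 2 then (pvParseNumB (ps.getD 1 []), pvParseNumB (ps.getD 0 []))
  else ([], [])   -- Python raises ValueError (unpacking) here; excluded by Pre_

-- ===== PRECONDITION & SPEC =====
-- A (and B) raise ValueError unless contraction.split(" -> ") has exactly two parts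
def Pre_get_key_from_contraction (contraction : String) : Prop :=
  (PySem.Chars.splitOn contraction.toList " -> ".toList).length = 2
instance (contraction : String) : Decidable (Pre_get_key_from_contraction contraction) := by unfold Pre_get_key_from_contraction; infer_instance

def pvWitness_get_key_from_contraction : String := "(10s,4p) -> [3s,2p]"

def pvEndsD (s : List Char) : Bool := (s.getLast?.map PySem.Chars.isdigit).getD false

-- On inputs where either part of the arrow-split ends in a digit, A drops that final number (its buffer is never
-- flushed after the loop) while B returns it; the final digit run is evidently part of the key.
def D_get_key_from_contraction (contraction : String) : Prop :=
  (PySem.Chars.splitOn contraction.toList " -> ".toList).length = 2 ∧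
  (pvEndsD ((PySem.Chars.splitOn contraction.toList " -> ".toList).getD 0 []) = true ∨
   pvEndsD ((PySem.Chars.splitOn contraction.toList " -> ".toList).getD 1 []) = true)
instance (contraction : String) : Decidable (D_get_key_from_contraction contraction) := by unfold D_get_key_from_contraction; infer_instance

def Spec_get_key_from_contraction (contraction : String) (out : List Int × List Int) : Prop := ¬ D_get_key_from_contraction contraction → out = get_key_from_contraction_alt contraction
instance (contraction : String) (out : List Int × List Int) : Decidable (Spec_get_key_from_contraction contraction out) := by unfold Spec_get_key_from_contraction; infer_instance

def pvDiffWitness_get_key_from_contraction : String := "3 -> 2"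
def pvDiffWitnessOut_get_key_from_contraction : (List Int × List Int) × (List Int × List Int) :=
  (([], []), ([2], [3]))

-- ===== CLAIM (what is proved, stated in full; the proofs are below) =====
def Claim_unchanged_get_key_from_contraction : Prop := ∀ (contraction : String), Dom_get_key_from_contraction contraction → Pre_get_key_from_contraction contraction → Spec_get_key_from_contraction contraction (get_key_from_contraction contraction)
def Claim_changed_get_key_from_contraction : Prop := Dom_get_key_from_contraction (pvDiffWitness_get_key_from_contraction) ∧ Pre_get_key_from_contraction (pvDiffWitness_get_key_from_contraction) ∧ D_get_key_from_contraction (pvDiffWitness_get_key_from_contraction) ∧ get_key_from_contraction (pvDiffWitness_get_key_from_contraction) = pvDiffWitnessOut_get_key_from_contraction.1 ∧ get_key_from_contraction_alt (pvDiffWitness_get_key_from_contraction) = pvDiffWitnessOut_get_key_from_contraction.2 ∧ pvDiffWitnessOut_get_key_from_contraction.1 ≠ pvDiffWitnessOut_get_key_from_contraction.2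
def Claim_exact_get_key_from_contraction : Prop := ∀ (contraction : String), Dom_get_key_from_contraction contraction → Pre_get_key_from_contraction contraction → D_get_key_from_contraction contraction → get_key_from_contraction contraction ≠ get_key_from_contraction_alt contraction

-- ===== LEMMAS AND PROOFS =====

lemma pv_isspace_blank (c : Char) : PySem.Chars.isspace (pvBlank c) = !PySem.Chars.isdigit c := by
  by_cases h : PySem.Chars.isdigit c = true
  · simp only [pvBlank, h, if_pos, Bool.not_true]
    simp only [PySem.Chars.isdigit, Bool.and_eq_true, decide_eq_true_eq] at h
    have h1 : ('0' : Char).toNat ≤ c.toNat := Fin.mk_le_mk.mp h.1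
    have h2 : c.toNat ≤ ('9' : Char).toNat := Fin.mk_le_mk.mp h.2
    have e1 : ('0' : Char).toNat = 48 := by decide
    have e2 : ('9' : Char).toNat = 57 := by decide
    simp only [PySem.Chars.isspace]
    simp only [Bool.or_eq_false_iff, Bool.and_eq_false_iff, decide_eq_false_iff_not]
    omega
  · have h' : PySem.Chars.isdigit c = false := by simpa using h
    simp [pvBlank, h']
    decide

lemma pvEndsD_append_cons (l : List Char) (c : Char) (t : List Char) :
    pvEndsD (l ++ c :: t) = pvEndsD (c :: t) := by
  unfold pvEndsD; rw [List.getLast?_append_cons]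

lemma pvEndsD_cons_of_ne_nil (c : Char) (t : List Char) (h : t ≠ []) :
    pvEndsD (c :: t) = pvEndsD t := by
  cases t with
  | nil => exact absurd rfl h
  | cons d u =>
    unfold pvEndsD
    rw [show c :: d :: u = [c] ++ d :: u from rfl, List.getLast?_append_cons]

lemma pv_main (s : List Char) : ∀ (buf : List Char) (accR : List (List Char)),
    (∀ c ∈ buf, PySem.Chars.isdigit c = true) →
    pvEndsD (buf ++ s) = false →
    (s.foldl pvStepA ((accR.reverse).map pvToInt, buf)).1
      = (PySem.Chars.split₀.go (s.map pvBlank) buf.reverse accR).map pvToInt := by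
  induction s with
  | nil =>
    intro buf accR hdig hend
    have hbuf : buf = [] := by
      cases buf with
      | nil => rfl
      | cons c bs =>
        exfalso
        have hne : (c :: bs : List Char) ≠ [] := by simp
        have hmem := List.getLast_mem hne
        have hd := hdig _ hmem
        rw [List.append_nil] at hend
        unfold pvEndsD at hend
        rw [List.getLast?_eq_some_getLast hne] at hend
        simp [hd] at hend
    subst hbuf
    simp [PySem.Chars.split₀.go]
  | cons c t ih =>
    intro buf accR hdig hend
    by_cases hd : PySem.Chars.isdigit c = true
    · have hstep : pvStepA ((accR.reverse).map pvToInt, buf) c = ((accR.reverse).map pvToInt, buf ++ [c]) := by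
        simp [pvStepA, hd]
      have hsp : PySem.Chars.isspace (pvBlank c) = false := by rw [pv_isspace_blank, hd]; rfl
      have hbl : pvBlank c = c := by simp [pvBlank, hd]
      rw [List.foldl_cons, hstep, List.map_cons]
      rw [PySem.Chars.split₀.go, if_neg (by simp [hsp]), hbl]
      have := ih (buf ++ [c]) accR
        (by intro x hx; rcases List.mem_append.mp hx with h1 | h1
            · exact hdig _ h1
            · simp at h1; subst h1; exact hd)
        (by simpa [List.append_assoc] using hend)
      simpa using this
    · have hdf : PySem.Chars.isdigit c = false := by simpa using hd
      have hsp : PySem.Chars.isspace (pvBlank c) = true := by rw [pv_isspace_blank, hdf]; rfl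
      have hendt : pvEndsD t = false := by
        cases t with
        | nil => rfl
        | cons d u =>
          rw [pvEndsD_append_cons, pvEndsD_cons_of_ne_nil c _ (by simp)] at hend
          exact hend
      rw [List.foldl_cons, List.map_cons]
      rw [PySem.Chars.split₀.go, if_pos (by simp [hsp])]
      by_cases hb : buf = []
      · subst hb
        simp only [pvStepA, hdf, Bool.false_eq_true, List.isEmpty_nil, if_pos,
          List.reverse_nil]
        simpa using ih [] accR (by simp) (by simpa using hendt)
      · have hbe : buf.isEmpty = false := by simpa [List.isEmpty_iff] using hb
        have hstep : pvStepA ((accR.reverse).map pvToInt, buf) c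
            = ((accR.reverse).map pvToInt ++ [pvToInt buf], []) := by
          simp [pvStepA, hdf, hbe]
        rw [hstep, if_neg (by simp [List.isEmpty_iff, hb])]
        simp only [List.reverse_reverse]
        have := ih [] (buf :: accR) (by simp) (by simpa using hendt)
        simpa using this

lemma pv_main_len (s : List Char) : ∀ (buf : List Char) (accR : List (List Char)),
    (∀ c ∈ buf, PySem.Chars.isdigit c = true) →
    pvEndsD (buf ++ s) = true →
    ((s.foldl pvStepA ((accR.reverse).map pvToInt, buf)).1).length + 1
      = ((PySem.Chars.split₀.go (s.map pvBlank) buf.reverse accR).map pvToInt).length := by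
  induction s with
  | nil =>
    intro buf accR hdig hend
    have hbne : buf ≠ [] := by
      intro h; subst h; simp [pvEndsD] at hend
    have hbe : (buf.reverse).isEmpty = false := by simp [hbne]
    simp only [List.map_nil, List.foldl_nil]
    rw [PySem.Chars.split₀.go]
    simp [hbe]
  | cons c t ih =>
    intro buf accR hdig hend
    by_cases hd : PySem.Chars.isdigit c = true
    · have hstep : pvStepA ((accR.reverse).map pvToInt, buf) c = ((accR.reverse).map pvToInt, buf ++ [c]) := by
        simp [pvStepA, hd]
      have hsp : PySem.Chars.isspace (pvBlank c) = false := by rw [pv_isspace_blank, hd]; rfl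
      have hbl : pvBlank c = c := by simp [pvBlank, hd]
      rw [List.foldl_cons, hstep, List.map_cons]
      rw [PySem.Chars.split₀.go, if_neg (by simp [hsp]), hbl]
      have := ih (buf ++ [c]) accR
        (by intro x hx; rcases List.mem_append.mp hx with h1 | h1
            · exact hdig _ h1
            · simp at h1; subst h1; exact hd)
        (by simpa [List.append_assoc] using hend)
      simpa using this
    · have hdf : PySem.Chars.isdigit c = false := by simpa using hd
      have hsp : PySem.Chars.isspace (pvBlank c) = true := by rw [pv_isspace_blank, hdf]; rfl
      have hendt : pvEndsD t = true := by
        cases t with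
        | nil =>
          exfalso
          rw [pvEndsD_append_cons] at hend
          simp [pvEndsD, hdf] at hend
        | cons d u =>
          rw [pvEndsD_append_cons, pvEndsD_cons_of_ne_nil c _ (by simp)] at hend
          exact hend
      rw [List.foldl_cons, List.map_cons]
      rw [PySem.Chars.split₀.go, if_pos (by simp [hsp])]
      by_cases hb : buf = []
      · subst hb
        simp only [pvStepA, hdf, Bool.false_eq_true, List.isEmpty_nil, if_pos,
          List.reverse_nil]
        simpa using ih [] accR (by simp) (by simpa using hendt)
      · have hbe : buf.isEmpty = false := by simpa [List.isEmpty_iff] using hb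
        have hstep : pvStepA ((accR.reverse).map pvToInt, buf) c
            = ((accR.reverse).map pvToInt ++ [pvToInt buf], []) := by
          simp [pvStepA, hdf, hbe]
        rw [hstep, if_neg (by simp [List.isEmpty_iff, hb])]
        simp only [List.reverse_reverse]
        have := ih [] (buf :: accR) (by simp) (by simpa using hendt)
        simpa using this

lemma pvToIntB_eq : pvToIntB = pvToInt := rfl

lemma pv_parse_eq (s : List Char) (h : pvEndsD s = false) : pvParseNumA s = pvParseNumB s := by
  have := pv_main s [] [] (by simp) (by simpa using h)
  simpa [pvParseNumA, pvParseNumB, pvToIntB_eq, PySem.Chars.split₀] using this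

lemma pv_parse_ne (s : List Char) (h : pvEndsD s = true) : pvParseNumA s ≠ pvParseNumB s := by
  have hlen := pv_main_len s [] [] (by simp) (by simpa using h)
  intro heq
  have h1 : (pvParseNumA s).length + 1 = (pvParseNumB s).length := by
    simpa [pvParseNumA, pvParseNumB, pvToIntB_eq, PySem.Chars.split₀] using hlen
  rw [heq] at h1
  omega

-- ===== VERDICT (by name: the statement is the Claim_ definition above) =====
theorem get_key_from_contraction_spec : Claim_unchanged_get_key_from_contraction := by
  intro contraction hdom hpre
  unfold Spec_get_key_from_contraction
  intro hD
  unfold Pre_get_key_from_contraction at hpre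
  obtain ⟨p, q, hpq⟩ := List.length_eq_two.mp hpre
  unfold D_get_key_from_contraction at hD
  simp only [hpq, List.length_cons, List.length_nil, List.getD, List.getElem?_cons_zero,
    List.getElem?_cons_succ, Option.getD_some, true_and, not_or, Bool.not_eq_true] at hD
  unfold get_key_from_contraction get_key_from_contraction_alt
  simp only [hpq]
  have hp : pvEndsD p = false := by simpa using hD.1
  have hq : pvEndsD q = false := by simpa using hD.2
  norm_num [List.getD]
  rw [pv_parse_eq q hq, pv_parse_eq p hp]
  exact ⟨rfl, rfl⟩

theorem get_key_from_contraction_changed : Claim_changed_get_key_from_contraction := by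
  unfold Claim_changed_get_key_from_contraction; decide

theorem get_key_from_contraction_tight : Claim_exact_get_key_from_contraction := by
  intro contraction hdom hpre hD heq
  unfold Pre_get_key_from_contraction at hpre
  obtain ⟨p, q, hpq⟩ := List.length_eq_two.mp hpre
  unfold D_get_key_from_contraction at hD
  simp only [hpq, List.getD, List.getElem?_cons_zero, List.getElem?_cons_succ,
    Option.getD_some] at hD
  unfold get_key_from_contraction get_key_from_contraction_alt at heq
  simp only [hpq] at heq
  norm_num [List.getD] at heq
  have heq' := heq
  rcases hD.2 with h | h
  · exact pv_parse_ne p h heq'.2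
  · exact pv_parse_ne q h heq'.1
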